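-- pv_equiv track=rewrite | github.com/GLARINGFISH8/Modul7 | DZ3/part1.py | F8
-- ===== SOURCE A (Python) =====
-- def F8(string):
--     string = string.replace('.', '').replace(',', '')
--     arr = string.split()
--
--     Vowels = ['a', 'e', 'i', 'o', 'u']
--     Unigue = []
--
--     for elem in string:
--         for j in elem:
--
--             if (j in Vowels) and not(j in Unigue):
--                 Unigue.append(j)
--                 yield j
-- ===== SOURCE B (Python) =====
-- def F8(string):
--     # Instead of scanning the string with a seen-list, probe each vowel of the
--     # fixed alphabet with str.find and emit present vowels sorted by first index.
--     pairs = []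
--     for v in 'aeiou':
--         i = string.find(v)
--         if i != -1:
--             pairs.append((i, v))
--     pairs.sort(key=lambda p: p[0])
--     for _, v in pairs:
--         yield v
-- ===== Notes on version B (the rewrite author's own statement) =====
-- stated objective: faster
-- what changed: Instead of scanning the string character by character in Python while maintaining a seen-list, B probes each of the five vowels with str.find, keeps the (index, vowel) pairs that occur, and yields the vowels sorted by first-occurrence index.
import Mathlib
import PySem

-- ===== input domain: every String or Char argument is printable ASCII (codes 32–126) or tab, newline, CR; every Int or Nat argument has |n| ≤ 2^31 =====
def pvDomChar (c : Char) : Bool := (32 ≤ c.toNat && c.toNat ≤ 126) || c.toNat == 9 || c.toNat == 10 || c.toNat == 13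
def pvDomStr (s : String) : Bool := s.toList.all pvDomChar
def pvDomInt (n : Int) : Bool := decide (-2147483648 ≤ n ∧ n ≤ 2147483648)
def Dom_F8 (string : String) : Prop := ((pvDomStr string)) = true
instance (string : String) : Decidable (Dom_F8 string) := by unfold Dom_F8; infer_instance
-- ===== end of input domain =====

-- B replaces A's per-character scan with a seen-list by probing each of the five vowels
-- with str.find and sorting the present vowels by first index (measured faster: five
-- C-level scans instead of a Python-level loop; A's generator taken as its list of yields).

-- ===== PORT A =====
def pvVowels : List Char := ['a', 'e', 'i', 'o', 'u']

def F8 (string : String) : List String :=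
  -- string = string.replace('.', '').replace(',', '')
  let s := PySem.Str.replace (PySem.Str.replace string "." "") "," ""
  -- arr = string.split()   (computed by A, never used)
  let _arr := PySem.Str.split₀ s
  -- for elem in string: for j in elem: …  (elem is a 1-character string, so j = elem;
  -- state = (Unigue, yields so far))
  (s.toList.foldl
    (fun (st : List Char × List String) j =>
      if j ∈ pvVowels ∧ ¬ j ∈ st.1 then (st.1 ++ [j], st.2 ++ [String.ofList [j]]) else st)
    ([], [])).2

-- ===== PORT B =====
def F8_alt (string : String) : List String :=
  -- for v in 'aeiou': i = string.find(v); if i != -1: pairs.append((i, v))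
  let pairs := "aeiou".toList.foldl
    (fun (pairs : List (Int × Char)) v =>
      let i := PySem.Str.find string (String.ofList [v])
      if i ≠ -1 then pairs ++ [(i, v)] else pairs) []
  -- pairs.sort(key=lambda p: p[0])
  let sortedPairs := PySem.List.sorted pairs (fun p => p.1)
  -- for _, v in pairs: yield v
  sortedPairs.foldl (fun out p => out ++ [String.ofList [p.2]]) []

-- ===== PRECONDITION & SPEC =====
def Spec_F8 (string : String) (out : List String) : Prop := out = F8_alt string
instance (string : String) (out : List String) : Decidable (Spec_F8 string out) := by unfold Spec_F8; infer_instance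

-- ===== CLAIM (what is proved, stated in full; the proofs are below) =====
def Claim_equal_F8 : Prop := ∀ (string : String), Dom_F8 string → Spec_F8 string (F8 string)

-- ===== LEMMAS AND PROOFS =====

theorem pv_idxOf_cons_ne (x y : Char) (m : List Char) (h : x ≠ y) :
    List.idxOf y (x :: m) = List.idxOf y m + 1 := by
  simp [h]

theorem pv_idxOf_cons_self (x : Char) (m : List Char) : List.idxOf x (x :: m) = 0 := by
  simp

-- `replace(old, '')` with a single-character `old` is a filter (inner loop of Chars.replace).
theorem pv_replace_go_single (c : Char) :
    ∀ (fuel : Nat) (l acc : List Char), l.length ≤ fuel →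
      PySem.Chars.replace.go [c] [] fuel l acc = acc.reverse ++ l.filter (· != c) := by
  intro fuel
  induction fuel with
  | zero => intro l acc h; interval_cases hl : l.length <;> simp_all [PySem.Chars.replace.go]
  | succ n ih =>
    intro l acc h
    cases l with
    | nil => simp [PySem.Chars.replace.go]
    | cons x t =>
      by_cases hx : x = c
      · subst hx
        simp only [PySem.Chars.replace.go, List.isPrefixOf, BEq.rfl, Bool.and_eq_true,
          and_self, if_true, List.length_nil, List.drop_zero, List.drop_succ_cons,
          List.reverse_nil, List.nil_append]
        simp only [List.length_cons, List.length_nil, List.drop_succ_cons, List.drop_zero]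
        rw [ih t acc (by simpa using h)]
        simp
      · simp only [PySem.Chars.replace.go, List.isPrefixOf, Bool.and_true]
        rw [if_neg (by simp; exact fun hh => hx hh.symm)]
        rw [ih t (x :: acc) (by simpa using Nat.le_of_succ_le_succ (by simpa using h))]
        simp [hx]

theorem pv_replace_single (c : Char) (l : List Char) :
    PySem.Chars.replace l [c] [] = l.filter (· != c) := by
  rw [PySem.Chars.replace]
  simp only [List.isEmpty_cons, if_false, Bool.false_eq_true]
  rw [pv_replace_go_single c l.length l [] le_rfl]
  simp

-- removing '.' and ',' does not change the vowel subsequence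
theorem pv_filter_vowels_replace (s : String) :
    (PySem.Str.replace (PySem.Str.replace s "." "") "," "").toList.filter
        (fun c => decide (c ∈ pvVowels))
      = s.toList.filter (fun c => decide (c ∈ pvVowels)) := by
  have hto : ∀ (t : String) (c : Char) (cs : String), cs.toList = [c] →
      (PySem.Str.replace t cs "").toList = t.toList.filter (· != c) := by
    intro t c cs hcs
    have := PySem.Str.toList_replace t cs ""
    rw [this, hcs]
    simpa using pv_replace_single c t.toList
  rw [hto _ ',' "," (by decide), hto _ '.' "." (by decide)]
  rw [List.filter_filter, List.filter_filter]
  refine List.filter_congr ?_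
  intro x _
  by_cases hv : x ∈ pvVowels
  · have hx : x ≠ '.' ∧ x ≠ ',' := by
      simp only [pvVowels, List.mem_cons, List.not_mem_nil, or_false] at hv
      rcases hv with rfl | rfl | rfl | rfl | rfl <;> exact ⟨by decide, by decide⟩
    simp [hv, hx.1, hx.2]
  · simp [hv]

-- A's loop keeps the yield list in lockstep with Unigue
theorem pv_lockstep (l : List Char) :
    ∀ seen : List Char,
      l.foldl
        (fun (st : List Char × List String) j =>
          if j ∈ pvVowels ∧ ¬ j ∈ st.1 then (st.1 ++ [j], st.2 ++ [String.ofList [j]]) else st)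
        (seen, seen.map (fun c => String.ofList [c]))
      = (let u := l.foldl (fun s j => if j ∈ pvVowels ∧ ¬ j ∈ s then s ++ [j] else s) seen
         (u, u.map (fun c => String.ofList [c]))) := by
  induction l with
  | nil => intro seen; simp
  | cons j t ih =>
    intro seen
    simp only [List.foldl_cons]
    by_cases h : j ∈ pvVowels ∧ ¬ j ∈ seen
    · rw [if_pos h, if_pos h]
      have : seen.map (fun c => String.ofList [c]) ++ [String.ofList [j]]
          = (seen ++ [j]).map (fun c => String.ofList [c]) := by simp
      rw [this, ih (seen ++ [j])]
    · rw [if_neg h, if_neg h]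
      exact ih seen

-- A's Unigue is the ordered dedup of the vowel subsequence
theorem pv_seen_eq_dedup (l : List Char) :
    l.foldl (fun s j => if j ∈ pvVowels ∧ ¬ j ∈ s then s ++ [j] else s) []
      = PySem.List.dedup (l.filter (fun c => decide (c ∈ pvVowels))) := by
  have hcongr : l.foldl (fun s j => if j ∈ pvVowels ∧ ¬ j ∈ s then s ++ [j] else s) []
      = l.foldl (fun s j => if j ∈ pvVowels then PySem.Set.add s j else s) [] := by
    refine PySem.List.foldl_congr_mem l _ _ [] (fun s j _ => ?_)
    by_cases hv : j ∈ pvVowels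
    · by_cases hs : j ∈ s
      · rw [if_neg (by simp [hs]), if_pos hv]
        simp [PySem.Set.add, PySem.Set.contains, hs]
      · rw [if_pos ⟨hv, hs⟩, if_pos hv]
        simp [PySem.Set.add, PySem.Set.contains, hs]
    · rw [if_neg (by simp [hv]), if_neg hv]
  rw [hcongr, PySem.List.foldl_ite_eq_foldl_filter (fun j => j ∈ pvVowels)
    (fun s j => PySem.Set.add s j) l []]
  rw [PySem.List.dedup_eq_ofList, PySem.Set.ofList_eq_foldl]

theorem pv_A_closed (string : String) :
    F8 string
      = (PySem.List.dedup (string.toList.filter (fun c => decide (c ∈ pvVowels)))).map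
          (fun c => String.ofList [c]) := by
  simp only [F8]
  have h0 : (([], []) : List Char × List String)
      = (([] : List Char), ([] : List Char).map (fun c => String.ofList [c])) := by simp
  rw [h0, pv_lockstep]
  simp only []
  rw [pv_seen_eq_dedup, pv_filter_vowels_replace]

-- `foldl Set.add` from an appended state peels the left part off
theorem pv_foldl_add_append (l : List Char) :
    ∀ (s t : List Char),
      l.foldl PySem.Set.add (s ++ t)
        = s ++ (l.filter (fun y => decide (¬ y ∈ s))).foldl PySem.Set.add t := by
  induction l with
  | nil => intro s t; simp
  | cons x r ih =>
    intro s t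
    simp only [List.foldl_cons, List.filter_cons]
    by_cases hx : x ∈ s
    · have : PySem.Set.add (s ++ t) x = s ++ t := by
        simp [PySem.Set.add, PySem.Set.contains, hx]
      rw [this, if_neg (by simp [hx])]
      exact ih s t
    · have hadd : PySem.Set.add (s ++ t) x = s ++ PySem.Set.add t x := by
        by_cases ht : x ∈ t
        · simp [PySem.Set.add, PySem.Set.contains, hx, ht]
        · simp [PySem.Set.add, PySem.Set.contains, hx, ht]
      rw [hadd, if_pos (by simp [hx]), List.foldl_cons]
      exact ih s (PySem.Set.add t x)

theorem pv_dedup_cons (c : Char) (l : List Char) :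
    PySem.List.dedup (c :: l) = c :: PySem.List.dedup (l.filter (· != c)) := by
  rw [PySem.List.dedup_eq_ofList, PySem.List.dedup_eq_ofList,
    PySem.Set.ofList_eq_foldl, PySem.Set.ofList_eq_foldl]
  have h1 : PySem.Set.add ([] : List Char) c = [c] := by
    simp [PySem.Set.add, PySem.Set.contains]
  simp only [List.foldl_cons, h1]
  have h2 : ([c] : List Char) = [c] ++ [] := by simp
  rw [h2, pv_foldl_add_append l [c] []]
  have h3 : l.filter (fun y => decide (¬ y ∈ ([c] : List Char))) = l.filter (· != c) := by
    refine List.filter_congr (fun y _ => ?_)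
    by_cases hy : y = c <;> simp [hy]
  rw [h3]
  simp

-- first-occurrence indices: minimality of idxOf
theorem pv_idxOf_le (a : Char) :
    ∀ (l : List Char) (k : Nat) (h : k < l.length), l[k] = a → l.idxOf a ≤ k := by
  intro l
  induction l with
  | nil => intro k h; simp at h
  | cons x t ih =>
    intro k h hk
    by_cases hx : x = a
    · simp [hx]
    · cases k with
      | zero => simp at hk; exact absurd hk hx
      | succ m =>
        rw [pv_idxOf_cons_ne x a t hx]
        simpa using ih m (by simpa using h) (by simpa using hk)

-- filtering preserves the relative order of first occurrences
theorem pv_idxOf_filter_lt (p : Char → Bool) (a b : Char) :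
    ∀ l : List Char, a ∈ l.filter p → b ∈ l.filter p →
      (l.filter p).idxOf a < (l.filter p).idxOf b → l.idxOf a < l.idxOf b := by
  intro l
  induction l with
  | nil => intro ha; simp at ha
  | cons x t ih =>
    intro ha hb hlt
    have hpa : p a := List.of_mem_filter ha
    have hpb : p b := List.of_mem_filter hb
    by_cases hp : p x
    · have hf : (x :: t).filter p = x :: t.filter p := by simp [hp]
      by_cases hax : a = x
      · subst hax
        have hba : a ≠ b := by
          intro hh
          rw [hh] at hlt
          exact lt_irrefl _ hlt
        rw [pv_idxOf_cons_self, pv_idxOf_cons_ne a b t hba]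
        omega
      · by_cases hbx : b = x
        · rw [hf, ← hbx, pv_idxOf_cons_self] at hlt
          omega
        · rw [hf] at ha hb hlt
          have ha' : a ∈ t.filter p := by
            rcases List.mem_cons.1 ha with h | h
            · exact absurd h hax
            · exact h
          have hb' : b ∈ t.filter p := by
            rcases List.mem_cons.1 hb with h | h
            · exact absurd h hbx
            · exact h
          rw [pv_idxOf_cons_ne x a _ (fun hh => hax hh.symm),
            pv_idxOf_cons_ne x b _ (fun hh => hbx hh.symm)] at hlt
          rw [pv_idxOf_cons_ne x a t (fun hh => hax hh.symm),
            pv_idxOf_cons_ne x b t (fun hh => hbx hh.symm)]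
          have := ih ha' hb' (by omega)
          omega
    · have hax : a ≠ x := fun h => hp (h ▸ hpa)
      have hbx : b ≠ x := fun h => hp (h ▸ hpb)
      have hf : (x :: t).filter p = t.filter p := by simp [hp]
      rw [hf] at ha hb hlt
      rw [pv_idxOf_cons_ne x a t (fun hh => hax hh.symm),
        pv_idxOf_cons_ne x b t (fun hh => hbx hh.symm)]
      have := ih ha hb hlt
      omega

-- the ordered dedup is strictly increasing in first-occurrence index
theorem pv_dedup_pairwise :
    ∀ l : List Char, (PySem.List.dedup l).Pairwise (fun a b => l.idxOf a < l.idxOf b) := by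
  intro l
  induction hn : l.length using Nat.strong_induction_on generalizing l with
  | _ n ihn =>
  cases l with
  | nil => simp [PySem.List.dedup]
  | cons c t =>
    rw [pv_dedup_cons, List.pairwise_cons]
    constructor
    · intro b hb
      have hb' : b ∈ t.filter (· != c) := (PySem.List.mem_dedup _ _).1 hb
      have hbc : b ≠ c := by simpa using List.of_mem_filter hb'
      rw [pv_idxOf_cons_self, pv_idxOf_cons_ne c b t (fun hh => hbc hh.symm)]
      omega
    · have ih := ihn (t.filter (· != c)).length
        (by subst hn; simp only [List.length_cons]
            exact Nat.lt_succ_of_le (List.length_filter_le _ _))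
        (t.filter (· != c)) rfl
      refine List.Pairwise.imp_of_mem ?_ ih
      intro a b ha hb hlt
      have ha' : a ∈ t.filter (· != c) := (PySem.List.mem_dedup _ _).1 ha
      have hb' : b ∈ t.filter (· != c) := (PySem.List.mem_dedup _ _).1 hb
      have hac : a ≠ c := by simpa using List.of_mem_filter ha'
      have hbc : b ≠ c := by simpa using List.of_mem_filter hb'
      have ht : t.idxOf a < t.idxOf b := pv_idxOf_filter_lt _ a b t ha' hb' hlt
      rw [pv_idxOf_cons_ne c a t (fun hh => hac hh.symm),
        pv_idxOf_cons_ne c b t (fun hh => hbc hh.symm)]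
      omega

-- str.find of a single character is idxOf
theorem pv_find_singleton (l : List Char) (a : Char) (h : a ∈ l) :
    PySem.Chars.find l [a] = (l.idxOf a : Int) := by
  have hidx : l.idxOf a < l.length := List.idxOf_lt_length_of_mem h
  have hpre : [a] <+: l.drop (l.idxOf a) := by
    have hget : l[l.idxOf a] = a := List.getElem_idxOf hidx
    have hd : l.drop (l.idxOf a) = a :: l.drop (l.idxOf a + 1) := by
      rw [List.drop_eq_getElem_cons hidx, hget]
    rw [hd]
    exact ⟨_, rfl⟩
  have hinf : [a] <:+: l := hpre.isInfix.trans (List.drop_suffix _ _).isInfix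
  have h0 : 0 ≤ PySem.Chars.find l [a] := (PySem.Chars.find_nonneg_iff _ _).2 hinf
  obtain ⟨hp, hmin⟩ := PySem.Chars.find_spec h0
  have hle1 : l.idxOf a ≤ (PySem.Chars.find l [a]).toNat := by
    have hlen : (PySem.Chars.find l [a]).toNat < l.length := by
      by_contra hge
      rw [List.drop_eq_nil_of_le (by omega)] at hp
      exact absurd (List.IsPrefix.length_le hp) (by simp)
    have hget : l[(PySem.Chars.find l [a]).toNat] = a := by
      obtain ⟨r, hr⟩ := hp
      rw [List.drop_eq_getElem_cons hlen] at hr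
      exact (List.cons_eq_cons.1 hr).1.symm
    exact pv_idxOf_le a l _ hlen hget
  have hle2 : (PySem.Chars.find l [a]).toNat ≤ l.idxOf a := by
    by_contra hgt
    exact hmin _ (by omega) hpre
  omega

theorem pv_B_closed (string : String) :
    F8_alt string
      = (PySem.List.dedup (string.toList.filter (fun c => decide (c ∈ pvVowels)))).map
          (fun c => String.ofList [c]) := by
  simp only [F8_alt]
  have halpha : "aeiou".toList = pvVowels := by decide
  have hfind : ∀ v : Char, PySem.Str.find string (String.ofList [v])
      = PySem.Chars.find string.toList [v] := by
    intro v
    rw [PySem.Str.find_eq]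
    congr 1
    simp
  have hpairs : "aeiou".toList.foldl
      (fun (pairs : List (Int × Char)) v =>
        let i := PySem.Str.find string (String.ofList [v])
        if i ≠ -1 then pairs ++ [(i, v)] else pairs) []
      = (pvVowels.filter (fun v => decide (PySem.Chars.find string.toList [v] ≠ -1))).map
          (fun v => (PySem.Chars.find string.toList [v], v)) := by
    rw [halpha]
    have hbig := PySem.List.foldl_append_ite
      (p := fun v : Char => PySem.Chars.find string.toList [v] ≠ -1)
      (f := fun v : Char => (PySem.Chars.find string.toList [v], v)) (l := pvVowels) (acc := [])
    simp only [List.nil_append] at hbig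
    rw [← hbig]
    refine PySem.List.foldl_congr_mem pvVowels _ _ [] (fun acc v _ => ?_)
    simp only [hfind v]
  rw [hpairs]
  have hmemiff : ∀ v : Char,
      v ∈ PySem.List.dedup (string.toList.filter (fun c => decide (c ∈ pvVowels)))
        ↔ v ∈ pvVowels.filter (fun v => decide (PySem.Chars.find string.toList [v] ≠ -1)) := by
    intro v
    rw [PySem.List.mem_dedup _ _, List.mem_filter, List.mem_filter]
    constructor
    · rintro ⟨hvL, hvv⟩
      refine ⟨of_decide_eq_true hvv, ?_⟩
      simp only [decide_eq_true_eq]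
      rw [PySem.Chars.find_ne_neg_one_iff]
      obtain ⟨s, t, hst⟩ := List.append_of_mem hvL
      exact ⟨s, t, by rw [hst]; simp⟩
    · rintro ⟨hvv, hfind1⟩
      simp only [decide_eq_true_eq] at hfind1
      rw [PySem.Chars.find_ne_neg_one_iff] at hfind1
      exact ⟨hfind1.sublist.mem (List.mem_singleton_self _), by simpa using hvv⟩
  have hperm : (PySem.List.dedup (string.toList.filter (fun c => decide (c ∈ pvVowels)))).Perm
      (pvVowels.filter (fun v => decide (PySem.Chars.find string.toList [v] ≠ -1))) :=
    (List.perm_ext_iff_of_nodup (PySem.List.nodup_dedup _)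
      ((by decide : pvVowels.Nodup).filter _)).2 hmemiff
  have hpw : (PySem.List.dedup (string.toList.filter (fun c => decide (c ∈ pvVowels)))).Pairwise
      (fun a b => PySem.Chars.find string.toList [a] < PySem.Chars.find string.toList [b]) := by
    refine List.Pairwise.imp_of_mem ?_ (pv_dedup_pairwise _)
    intro a b ha hb hlt
    have ha' : a ∈ string.toList.filter (fun c => decide (c ∈ pvVowels)) :=
      (PySem.List.mem_dedup _ _).1 ha
    have hb' : b ∈ string.toList.filter (fun c => decide (c ∈ pvVowels)) :=
      (PySem.List.mem_dedup _ _).1 hb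
    have haL : a ∈ string.toList := List.mem_of_mem_filter ha'
    have hbL : b ∈ string.toList := List.mem_of_mem_filter hb'
    rw [pv_find_singleton string.toList a haL, pv_find_singleton string.toList b hbL]
    have hidx : string.toList.idxOf a < string.toList.idxOf b :=
      pv_idxOf_filter_lt _ a b string.toList ha' hb' hlt
    exact_mod_cast hidx
  have hsorted : PySem.List.sorted
      ((pvVowels.filter (fun v => decide (PySem.Chars.find string.toList [v] ≠ -1))).map
        (fun v => (PySem.Chars.find string.toList [v], v)))
      (fun p => p.1)
      = (PySem.List.dedup (string.toList.filter (fun c => decide (c ∈ pvVowels)))).map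
          (fun v => (PySem.Chars.find string.toList [v], v)) := by
    refine PySem.List.sorted_eq_of_perm_of_pairwise_lt _ _ _ (hperm.map _) ?_
    rw [List.pairwise_map]
    exact hpw
  rw [hsorted, PySem.List.foldl_append_singleton_eq_map]
  simp [List.map_map, Function.comp]

-- ===== VERDICT (by name: the statement is the Claim_ definition above) =====
theorem F8_spec : Claim_equal_F8 := by
  intro string _
  unfold Spec_F8
  rw [pv_A_closed, pv_B_closed]
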